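-- pv_equiv track=rewrite | github.com/hunter-classes/127 | classcode/exam1/exam.py | q31
-- ===== SOURCE A (Python) =====
-- def q31(length,height):
--     result = ""
--     if height%2!=0:
--         height = height -1
--     for i in range(height):
--         if i%2==0:
--             result = result + "O"*length
--         else:
--             result = result + "X"*length
--         result = result + "\n";
--     return result
-- ===== SOURCE B (Python) =====
-- def q31(length, height):
--     n = height // 2
--     if n <= 0:
--         return ""
--     return ("O" * length + "\n" + "X" * length + "\n") * n
-- ===== Notes on version B (the rewrite author's own statement) =====
-- stated objective: simpler
-- what changed: Replaces the indexed loop with its parity branch by building the two-row O/X block once and repeating it height//2 times with string multiplication.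
import Mathlib
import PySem

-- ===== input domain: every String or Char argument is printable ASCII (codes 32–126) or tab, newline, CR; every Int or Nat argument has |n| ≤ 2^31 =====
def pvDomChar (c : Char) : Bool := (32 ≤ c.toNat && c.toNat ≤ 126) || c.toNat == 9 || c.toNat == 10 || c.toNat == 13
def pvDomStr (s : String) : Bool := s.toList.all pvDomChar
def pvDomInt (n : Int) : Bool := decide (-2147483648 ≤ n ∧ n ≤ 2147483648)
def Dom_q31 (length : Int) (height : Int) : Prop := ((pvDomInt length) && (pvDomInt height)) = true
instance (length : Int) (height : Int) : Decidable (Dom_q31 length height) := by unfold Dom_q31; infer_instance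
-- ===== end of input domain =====

-- B replaces A's indexed loop with parity branch by one two-row block repeated height//2 times (simpler decomposition; same cost).
-- ===== PORT A =====
def q31 (length : Int) (height : Int) : String :=
  String.ofList ((PySem.List.pyRange 0
      (if PySem.Int.mod height 2 ≠ 0 then height - 1 else height) 1).foldl
    (fun result i =>
      (if PySem.Int.mod i 2 = 0 then result ++ PySem.List.pyRepeat ['O'] length
       else result ++ PySem.List.pyRepeat ['X'] length) ++ ['\n']) [])

-- ===== PORT B =====
def q31_alt (length : Int) (height : Int) : String :=
  if PySem.Int.floordiv height 2 ≤ 0 then ""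
  else
    String.ofList (PySem.List.pyRepeat
      (PySem.List.pyRepeat ['O'] length ++ ['\n'] ++ PySem.List.pyRepeat ['X'] length ++ ['\n'])
      (PySem.Int.floordiv height 2))

-- ===== PRECONDITION & SPEC =====
def Spec_q31 (length : Int) (height : Int) (out : String) : Prop := out = q31_alt length height
instance (length : Int) (height : Int) (out : String) : Decidable (Spec_q31 length height out) := by unfold Spec_q31; infer_instance

-- ===== CLAIM (what is proved, stated in full; the proofs are below) =====
def Claim_equal_q31 : Prop := ∀ (length : Int) (height : Int), Dom_q31 length height → Spec_q31 length height (q31 length height)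

-- ===== LEMMAS AND PROOFS =====

-- A's loop over range(2*k) produces k copies of the two-row block.
theorem q31_loop_eq (length : Int) (k : Nat) :
    (PySem.List.pyRange 0 (2 * (k : Int)) 1).foldl (fun result i =>
      (if PySem.Int.mod i 2 = 0 then result ++ PySem.List.pyRepeat ['O'] length
       else result ++ PySem.List.pyRepeat ['X'] length) ++ ['\n']) []
    = (List.replicate k (PySem.List.pyRepeat ['O'] length ++ ['\n']
        ++ PySem.List.pyRepeat ['X'] length ++ ['\n'])).flatten := by
  induction k with
  | zero => simp [PySem.List.pyRange_one_eq_nil]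
  | succ k ih =>
    have htail : PySem.List.pyRange (2 * (k : Int)) (2 * ((k + 1 : Nat) : Int)) 1
        = [(2 * (k : Int)), 2 * (k : Int) + 1] := by
      rw [PySem.List.pyRange_one_cons (by push_cast; omega)]
      rw [PySem.List.pyRange_one_cons (by push_cast; omega)]
      rw [PySem.List.pyRange_one_eq_nil (by push_cast; omega)]
    have hsplit : PySem.List.pyRange 0 (2 * ((k + 1 : Nat) : Int)) 1
        = PySem.List.pyRange 0 (2 * (k : Int)) 1 ++ [(2 * (k : Int)), 2 * (k : Int) + 1] := by
      rw [PySem.List.pyRange_one_append 0 (2 * (k : Int)) (2 * ((k + 1 : Nat) : Int))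
            (by positivity) (by push_cast; omega), htail]
    have hmod0 : PySem.Int.mod (2 * (k : Int)) 2 = 0 := by
      rw [PySem.Int.mod_eq_emod_of_pos (by norm_num : (0:Int) < 2)]; omega
    have hmod1 : PySem.Int.mod (2 * (k : Int) + 1) 2 = 1 := by
      rw [PySem.Int.mod_eq_emod_of_pos (by norm_num : (0:Int) < 2)]; omega
    rw [hsplit, List.foldl_append, ih]
    rw [List.foldl_cons, List.foldl_cons, List.foldl_nil,
        if_pos hmod0, if_neg (by rw [hmod1]; norm_num)]
    rw [List.replicate_succ', List.flatten_append]
    simp [List.append_assoc]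

theorem q31_spec_aux (length : Int) (height : Int) :
    q31 length height = q31_alt length height := by
  unfold q31 q31_alt
  have hq := PySem.Int.floordiv_mul_add_mod height 2
  have hm0 : 0 ≤ PySem.Int.mod height 2 := PySem.Int.mod_nonneg _ (by norm_num)
  have hm2 : PySem.Int.mod height 2 < 2 := PySem.Int.mod_lt _ (by norm_num)
  set q : Int := PySem.Int.floordiv height 2 with hqdef
  have h2 : (if PySem.Int.mod height 2 ≠ 0 then height - 1 else height) = 2 * q := by
    split_ifs with h <;> omega
  rw [h2]
  by_cases hqn : q ≤ 0
  · rw [if_pos hqn, PySem.List.pyRange_one_eq_nil (by omega)]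
    rfl
  · rw [if_neg hqn]
    have hcast : q = ((q.toNat : Nat) : Int) := by omega
    rw [hcast, q31_loop_eq length q.toNat]
    have hmax : max q 0 = q := by omega
    simp [PySem.List.pyRepeat, hmax]

-- ===== VERDICT (by name: the statement is the Claim_ definition above) =====
theorem q31_spec : Claim_equal_q31 := by
  intro length height _
  exact q31_spec_aux length height
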